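-- pv_equiv track=rewrite | github.com/kibernetika-ai/fastmri-tf | exp/util.py | norm_text
-- ===== SOURCE A (Python) =====
-- def norm_text(v,use_pace=' '):
--     s = []
--     space = False
--     for i in v.lower():
--         if i.isalnum():
--             s.append(i)
--             space = (i==' ')
--         elif not space:
--             s.append(use_pace)
--             space = True
--     return ''.join(s)
-- ===== SOURCE B (Python) =====
-- def norm_text(v, use_pace=' '):
--     # Run-based: split the lowered string into maximal runs of alnum /
--     # non-alnum characters; keep alnum runs, replace each non-alnum run
--     # by a single use_pace.
--     t = v.lower()
--     n = len(t)
--     out = []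
--     i = 0
--     while i < n:
--         j = i + 1
--         if t[i].isalnum():
--             while j < n and t[j].isalnum():
--                 j += 1
--             out.append(t[i:j])
--         else:
--             while j < n and not t[j].isalnum():
--                 j += 1
--             out.append(use_pace)
--         i = j
--     return ''.join(out)
-- ===== Notes on version B (the rewrite author's own statement) =====
-- stated objective: alternative
-- what changed: B replaces A's stateful per-character scan (boolean 'space' flag) with a run-based two-pointer scan that finds each maximal alnum/non-alnum run and emits the run or one separator per group.
import Mathlib
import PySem

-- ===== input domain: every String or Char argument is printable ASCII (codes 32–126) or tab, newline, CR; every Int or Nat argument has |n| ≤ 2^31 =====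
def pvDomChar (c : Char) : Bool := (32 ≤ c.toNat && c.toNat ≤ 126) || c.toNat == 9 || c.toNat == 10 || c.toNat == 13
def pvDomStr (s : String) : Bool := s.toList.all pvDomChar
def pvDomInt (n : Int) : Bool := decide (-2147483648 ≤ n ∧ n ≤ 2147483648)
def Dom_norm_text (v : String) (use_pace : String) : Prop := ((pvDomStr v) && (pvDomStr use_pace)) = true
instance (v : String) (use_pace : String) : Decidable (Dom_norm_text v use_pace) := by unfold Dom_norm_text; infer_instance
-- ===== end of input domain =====

-- B replaces A's stateful per-character scan (boolean flag) with a run-based scan over maximal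
-- alnum / non-alnum runs; same O(n) cost, different decomposition.

-- ===== PORT A =====
-- single pass over v.lower() with accumulator list s and boolean flag 'space'
def norm_text (v : String) (use_pace : String) : String :=
  String.mk ((PySem.Str.lower v).toList.foldl
    (fun (st : List Char × Bool) (i : Char) =>
      if PySem.Chars.isalnum i then (st.1 ++ [i], i == ' ')
      else if st.2 = false then (st.1 ++ use_pace.toList, true)
      else st) ([], false)).1

-- ===== PORT B =====
-- Source B's inner while loops find the maximal run starting at the cursor; here the remaining
-- characters are the suffix list and takeWhile/dropWhile compute the same maximal run.
def normAltGo (up : List Char) : List Char → List Char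
  | [] => []
  | c :: cs =>
      if PySem.Chars.isalnum c then
        (c :: cs.takeWhile (fun x => PySem.Chars.isalnum x))
          ++ normAltGo up (cs.dropWhile (fun x => PySem.Chars.isalnum x))
      else
        up ++ normAltGo up (cs.dropWhile (fun x => !PySem.Chars.isalnum x))
termination_by l => l.length
decreasing_by
  · exact Nat.lt_succ_of_le (List.length_dropWhile_le _ _)
  · exact Nat.lt_succ_of_le (List.length_dropWhile_le _ _)

def norm_text_alt (v : String) (use_pace : String) : String :=
  String.mk (normAltGo use_pace.toList (PySem.Str.lower v).toList)

-- ===== PRECONDITION & SPEC =====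
def Spec_norm_text (v : String) (use_pace : String) (out : String) : Prop := out = norm_text_alt v use_pace
instance (v : String) (use_pace : String) (out : String) : Decidable (Spec_norm_text v use_pace out) := by unfold Spec_norm_text; infer_instance

-- ===== CLAIM (what is proved, stated in full; the proofs are below) =====
def Claim_equal_norm_text : Prop := ∀ (v : String) (use_pace : String), Dom_norm_text v use_pace → Spec_norm_text v use_pace (norm_text v use_pace)

-- ===== LEMMAS AND PROOFS =====

-- recursive characterisation of A's loop body (state = remaining input × space flag)
def normFA (up : List Char) : List Char → Bool → List Char
  | [], _ => []
  | c :: cs, sp =>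
      if PySem.Chars.isalnum c then c :: normFA up cs (c == ' ')
      else if sp = false then up ++ normFA up cs true
      else normFA up cs sp

theorem alnum_ne_space {c : Char} (h : PySem.Chars.isalnum c = true) : (c == ' ') = false := by
  cases h2 : (c == ' ') with
  | false => rfl
  | true =>
    have hc : c = ' ' := beq_iff_eq.mp h2
    subst hc
    exact absurd h (by decide)

theorem foldA (up : List Char) (l : List Char) (acc : List Char) (sp : Bool) :
    (l.foldl (fun (st : List Char × Bool) (i : Char) =>
      if PySem.Chars.isalnum i then (st.1 ++ [i], i == ' ')
      else if st.2 = false then (st.1 ++ up, true)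
      else st) (acc, sp)).1 = acc ++ normFA up l sp := by
  induction l generalizing acc sp with
  | nil => simp [normFA]
  | cons c cs ih =>
    by_cases hc : PySem.Chars.isalnum c = true
    · simp [List.foldl_cons, hc, normFA, ih]
    · cases sp with
      | false => simp [List.foldl_cons, hc, normFA, ih]
      | true => simp [List.foldl_cons, hc, normFA, ih]

theorem normFA_false_run (up : List Char) (l : List Char) :
    normFA up l false =
      l.takeWhile (fun x => PySem.Chars.isalnum x)
        ++ normFA up (l.dropWhile (fun x => PySem.Chars.isalnum x)) false := by
  induction l with
  | nil => simp [normFA]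
  | cons c cs ih =>
    by_cases hc : PySem.Chars.isalnum c = true
    · simp [normFA, hc, List.takeWhile_cons, List.dropWhile_cons, alnum_ne_space hc, ih]
    · simp [List.takeWhile_cons, List.dropWhile_cons, hc]

theorem normFA_true_drop (up : List Char) (l : List Char) :
    normFA up l true = normFA up (l.dropWhile (fun x => !PySem.Chars.isalnum x)) true := by
  induction l with
  | nil => simp
  | cons c cs ih =>
    by_cases hc : PySem.Chars.isalnum c = true
    · simp [List.dropWhile_cons, hc]
    · simp [normFA, hc, List.dropWhile_cons, ih]

theorem normFA_true_eq_false_dropped (up : List Char) (l : List Char) :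
    normFA up (l.dropWhile (fun x => !PySem.Chars.isalnum x)) true
      = normFA up (l.dropWhile (fun x => !PySem.Chars.isalnum x)) false := by
  induction l with
  | nil => simp [normFA]
  | cons c cs ih =>
    by_cases hc : PySem.Chars.isalnum c = true
    · simp [List.dropWhile_cons, hc, normFA]
    · simpa [List.dropWhile_cons, hc] using ih

theorem normFA_eq_altGo (up : List Char) : ∀ n l, l.length ≤ n → normFA up l false = normAltGo up l := by
  intro n
  induction n with
  | zero =>
    intro l hl
    have : l = [] := List.length_eq_zero_iff.mp (Nat.le_zero.mp hl)
    subst this; simp [normFA, normAltGo]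
  | succ n ih =>
    intro l hl
    cases l with
    | nil => simp [normFA, normAltGo]
    | cons c cs =>
      have hcs : cs.length ≤ n := Nat.succ_le_succ_iff.mp hl
      by_cases hc : PySem.Chars.isalnum c = true
      · have h1 : normFA up (c :: cs) false = c :: normFA up cs false := by
          simp [normFA, hc, alnum_ne_space hc]
        rw [h1, normFA_false_run up cs,
          ih _ (le_trans (List.length_dropWhile_le _ _) hcs)]
        simp [normAltGo, hc]
      · have h1 : normFA up (c :: cs) false = up ++ normFA up cs true := by
          simp [normFA, hc]
        rw [h1, normFA_true_drop up cs, normFA_true_eq_false_dropped up cs,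
          ih _ (le_trans (List.length_dropWhile_le _ _) hcs)]
        simp [normAltGo, hc]

-- ===== VERDICT (by name: the statement is the Claim_ definition above) =====
theorem norm_text_spec : Claim_equal_norm_text := by
  intro v use_pace _
  unfold Spec_norm_text norm_text norm_text_alt
  rw [foldA use_pace.toList _ [] false, List.nil_append,
    normFA_eq_altGo use_pace.toList (PySem.Str.lower v).toList.length _ le_rfl]
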